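-- pv_equiv track=rewrite | github.com/elsys/soft-dev-public | homeworks/24_Simeon_Hristov/02_avg_brigthness.py | check_sides
-- ===== SOURCE A (Python) =====
-- def check_sides(matrix, x, y, shape_coords_list = None):
-- 	matrix_cpy = matrix
-- 	if shape_coords_list is None:
-- 		shape_coords_list = []
-- 	shape_coords_list.append((x, y))
-- 	matrix_cpy[x][y] = 0
-- 	if x - 1 >= 0 and matrix_cpy[x - 1][y] != 0:
-- 		check_sides(matrix_cpy, x - 1, y, shape_coords_list)
--
-- 	if y - 1 >= 0 and matrix_cpy[x][y - 1] != 0: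
-- 		check_sides(matrix_cpy, x, y - 1, shape_coords_list)
--
-- 	if y + 1 < len(matrix[0]) and matrix_cpy[x][y + 1] != 0:
-- 		check_sides(matrix_cpy, x, y + 1, shape_coords_list)
--
-- 	if x + 1 < len(matrix) and matrix_cpy[x + 1][y] != 0:
-- 		check_sides(matrix_cpy, x + 1, y, shape_coords_list)
--
-- 	if x - 1 >= 0  and y - 1 >= 0 and matrix_cpy[x - 1][y - 1] != 0:
-- 		check_sides(matrix_cpy, x - 1, y - 1, shape_coords_list)
--
-- 	if x - 1 >= 0  and y + 1 < len(matrix[0]) and matrix_cpy[x - 1][y + 1] != 0: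
-- 		check_sides(matrix_cpy, x - 1, y + 1, shape_coords_list)
--
-- 	if x + 1 < len(matrix) and y - 1 >= 0 and  matrix_cpy[x + 1][y - 1] != 0:
-- 		check_sides(matrix_cpy, x + 1, y - 1, shape_coords_list)
--
-- 	if x + 1 < len(matrix) and y + 1 < len(matrix[0]) and matrix_cpy[x + 1][y + 1] != 0:
-- 		check_sides(matrix_cpy, x + 1, y + 1, shape_coords_list)
--
-- 	return shape_coords_list
-- ===== SOURCE B (Python) =====
-- # Iterative flood-fill with an explicit stack (mark-on-pop, reverse push order);
-- # like A it mutates matrix and shape_coords_list in place; return-value equivalence is what is proved.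
-- def check_sides(matrix, x, y, shape_coords_list = None):
--     if shape_coords_list is None:
--         shape_coords_list = []
--     stack = [(x, y)]
--     first = True
--     while stack:
--         cx, cy = stack.pop()
--         if not first and matrix[cx][cy] == 0:
--             continue
--         first = False
--         shape_coords_list.append((cx, cy))
--         matrix[cx][cy] = 0
--         height, width = len(matrix), len(matrix[0])
--         for nx, ny in ((cx + 1, cy + 1), (cx + 1, cy - 1), (cx - 1, cy + 1), (cx - 1, cy - 1),
--                        (cx + 1, cy), (cx, cy + 1), (cx, cy - 1), (cx - 1, cy)):
--             if 0 <= nx < height and 0 <= ny < width: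
--                 stack.append((nx, ny))
--     return shape_coords_list
-- ===== Notes on version B (the rewrite author's own statement) =====
-- stated objective: alternative
-- what changed: A's recursive 8-way DFS is rewritten as an iterative flood-fill with an explicit stack: cells are recorded and zeroed on pop (skipping cells already zeroed), and neighbours are pushed in the reverse of A's check order so the visit order is identical.
-- outside the precondition, e.g. on check_sides([[1, 1]], -1, 0, None): A returns [(-1, 0), (-1, 1)], B returns [(-1, 0), (0, 1)]; on check_sides([[0, 0, 0], [0, 0]], 1, 0, None): A returns [(1, 0)], B returns [(1, 0)]
import Mathlib
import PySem

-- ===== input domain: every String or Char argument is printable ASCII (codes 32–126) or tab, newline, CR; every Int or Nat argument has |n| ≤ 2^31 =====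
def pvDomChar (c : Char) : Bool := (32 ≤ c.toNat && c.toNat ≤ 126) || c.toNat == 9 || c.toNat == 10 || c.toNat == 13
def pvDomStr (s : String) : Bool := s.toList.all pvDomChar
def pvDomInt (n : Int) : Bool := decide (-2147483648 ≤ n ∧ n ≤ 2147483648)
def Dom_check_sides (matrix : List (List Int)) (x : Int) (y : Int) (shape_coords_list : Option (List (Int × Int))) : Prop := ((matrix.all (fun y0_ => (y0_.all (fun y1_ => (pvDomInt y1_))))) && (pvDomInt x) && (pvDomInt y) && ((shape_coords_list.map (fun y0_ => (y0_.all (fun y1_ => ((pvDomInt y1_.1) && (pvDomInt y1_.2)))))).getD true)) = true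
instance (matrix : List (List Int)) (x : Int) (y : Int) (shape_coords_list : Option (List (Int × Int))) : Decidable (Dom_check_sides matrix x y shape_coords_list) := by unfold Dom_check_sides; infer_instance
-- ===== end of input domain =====

-- B rewrites A's recursive 8-way DFS as an iterative flood-fill with an explicit stack
-- (mark-on-pop, neighbours pushed in reverse check order); like A it mutates matrix and the
-- passed shape_coords_list in place — the equivalence proved here is about the RETURN value.

-- ===== PORT A =====
-- shared low-level helpers (Python list indexing/assignment on the in-range domain stated by Pre_)
abbrev PvSt := List (List Int) × List (Int × Int)
def pvH (m : List (List Int)) : Int := (m.length : Int)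
def pvW (m : List (List Int)) : Int := ((m.headD []).length : Int)
def pvCellN (m : List (List Int)) (i j : Nat) : Int := (m.getD i []).getD j 0
def pvCell (m : List (List Int)) (x y : Int) : Int := pvCellN m x.toNat y.toNat
def pvZeroN : List (List Int) → Nat → Nat → List (List Int)
  | [], _, _ => []
  | r :: t, 0, j => r.set j 0 :: t
  | r :: t, Nat.succ i, j => r :: pvZeroN t i j
def pvZero (m : List (List Int)) (x y : Int) : List (List Int) := pvZeroN m x.toNat y.toNat
def nzRow (row : List Int) : Nat := row.countP (fun v => decide (v ≠ 0))
def nzc (m : List (List Int)) : Nat := (m.map nzRow).sum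

-- Fuel-based transliteration of A's recursion (fuel = nzc+2 always exceeds the recursion depth).
-- Each of A's eight 'if guard: recurse' lines is one goAstep application, composed in A's order
-- (innermost first); the state pair is (matrix, shape_coords_list).
def goAstep (rec : List (List Int) → Int → Int → List (Int × Int) → PvSt)
    (cnd : PvSt → Prop) [DecidablePred cnd] (a b : Int) (s : PvSt) : PvSt :=
  if cnd s then rec s.1 a b s.2 else s
def goA : Nat → List (List Int) → Int → Int → List (Int × Int) → PvSt
  | 0, m, _, _, acc => (m, acc)
  | Nat.succ f, m, x, y, acc =>
    goAstep (goA f) (fun s => x + 1 < pvH s.1 ∧ y + 1 < pvW s.1 ∧ pvCell s.1 (x + 1) (y + 1) ≠ 0) (x + 1) (y + 1)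
      (goAstep (goA f) (fun s => x + 1 < pvH s.1 ∧ 0 ≤ y - 1 ∧ pvCell s.1 (x + 1) (y - 1) ≠ 0) (x + 1) (y - 1)
        (goAstep (goA f) (fun s => 0 ≤ x - 1 ∧ y + 1 < pvW s.1 ∧ pvCell s.1 (x - 1) (y + 1) ≠ 0) (x - 1) (y + 1)
          (goAstep (goA f) (fun s => 0 ≤ x - 1 ∧ 0 ≤ y - 1 ∧ pvCell s.1 (x - 1) (y - 1) ≠ 0) (x - 1) (y - 1)
            (goAstep (goA f) (fun s => x + 1 < pvH s.1 ∧ pvCell s.1 (x + 1) y ≠ 0) (x + 1) y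
              (goAstep (goA f) (fun s => y + 1 < pvW s.1 ∧ pvCell s.1 x (y + 1) ≠ 0) x (y + 1)
                (goAstep (goA f) (fun s => 0 ≤ y - 1 ∧ pvCell s.1 x (y - 1) ≠ 0) x (y - 1)
                  (goAstep (goA f) (fun s => 0 ≤ x - 1 ∧ pvCell s.1 (x - 1) y ≠ 0) (x - 1) y
                    (pvZero m x y, acc ++ [(x, y)]))))))))

def check_sides (matrix : List (List Int)) (x : Int) (y : Int) (shape_coords_list : Option (List (Int × Int))) : List (Int × Int) :=
  (goA (nzc matrix + 2) matrix x y (shape_coords_list.getD [])).2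

-- ===== PORT B =====
def okB (H W : Int) (p : Int × Int) : Bool := decide (0 ≤ p.1 ∧ p.1 < H ∧ 0 ≤ p.2 ∧ p.2 < W)
-- A-check-order neighbour list: consing its in-bounds members onto the stack = Source B pushing them in reverse order
def nbrs (x y : Int) : List (Int × Int) :=
  [(x - 1, y), (x, y - 1), (x, y + 1), (x + 1, y), (x - 1, y - 1), (x - 1, y + 1), (x + 1, y - 1), (x + 1, y + 1)]

-- transliteration of Source B's while-loop: stack head = top; record & zero on pop, skip popped zeros.
-- The Nat argument is fuel (9*nzc+19 always exceeds the number of loop iterations).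
def goB : Nat → List (List Int) → List (Int × Int) → List (Int × Int) → Bool → List (List Int) × List (Int × Int)
  | 0, m, acc, _, _ => (m, acc)
  | _ + 1, m, acc, [], _ => (m, acc)
  | f + 1, m, acc, (cx, cy) :: rest, first =>
    if first = false ∧ pvCell m cx cy = 0 then
      goB f m acc rest false
    else
      goB f (pvZero m cx cy) (acc ++ [(cx, cy)])
        ((nbrs cx cy).filter (okB (pvH (pvZero m cx cy)) (pvW (pvZero m cx cy))) ++ rest) false

def check_sides_alt (matrix : List (List Int)) (x : Int) (y : Int) (shape_coords_list : Option (List (Int × Int))) : List (Int × Int) :=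
  (goB (9 * nzc matrix + 19) matrix (shape_coords_list.getD []) [(x, y)] true).2

-- ===== PRECONDITION & SPEC =====
-- Pre_ excludes seeds that are negative or out of range (Python's negative-index wraparound / IndexError)
-- and matrices with a row shorter than row 0 (A indexes every visited row up to len(matrix[0]) and
-- raises IndexError when such a cell is inspected).
def Pre_check_sides (matrix : List (List Int)) (x : Int) (y : Int) (shape_coords_list : Option (List (Int × Int))) : Prop :=
  0 ≤ x ∧ x < pvH matrix ∧ 0 ≤ y ∧ y < pvW matrix ∧ ∀ row ∈ matrix, (matrix.headD []).length ≤ row.length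
instance (matrix : List (List Int)) (x : Int) (y : Int) (shape_coords_list : Option (List (Int × Int))) : Decidable (Pre_check_sides matrix x y shape_coords_list) := by unfold Pre_check_sides; infer_instance

def pvWitness_check_sides : List (List Int) × Int × Int × (Option (List (Int × Int))) :=
  ([[1, 0], [0, 1]], 0, 0, none)

def Spec_check_sides (matrix : List (List Int)) (x : Int) (y : Int) (shape_coords_list : Option (List (Int × Int))) (out : List (Int × Int)) : Prop := out = check_sides_alt matrix x y shape_coords_list
instance (matrix : List (List Int)) (x : Int) (y : Int) (shape_coords_list : Option (List (Int × Int))) (out : List (Int × Int)) : Decidable (Spec_check_sides matrix x y shape_coords_list out) := by unfold Spec_check_sides; infer_instance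

-- ===== CLAIM (what is proved, stated in full; the proofs are below) =====
def Claim_equal_check_sides : Prop := ∀ (matrix : List (List Int)) (x : Int) (y : Int) (shape_coords_list : Option (List (Int × Int))), Dom_check_sides matrix x y shape_coords_list → Pre_check_sides matrix x y shape_coords_list → Spec_check_sides matrix x y shape_coords_list (check_sides matrix x y shape_coords_list)

-- ===== LEMMAS AND PROOFS =====
theorem nzRow_set_le (row : List Int) (j : Nat) : nzRow (row.set j 0) ≤ nzRow row := by
  induction row generalizing j with
  | nil => simp [nzRow]
  | cons a t ih =>
    cases j with
    | zero =>
      simp only [List.set_cons_zero, nzRow, List.countP_cons]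
      split <;> split <;> simp_all
    | succ j =>
      simp only [List.set_cons_succ, nzRow, List.countP_cons]
      have := ih j
      simp only [nzRow] at this
      omega

theorem nzRow_set_lt (row : List Int) (j : Nat) (h : row.getD j 0 ≠ 0) : nzRow (row.set j 0) < nzRow row := by
  induction row generalizing j with
  | nil => simp at h
  | cons a t ih =>
    cases j with
    | zero =>
      have ha : a ≠ 0 := by simpa using h
      simp only [List.set_cons_zero, nzRow, List.countP_cons]
      simp [ha]
    | succ j =>
      have h' : t.getD j 0 ≠ 0 := by simpa using h
      simp only [List.set_cons_succ, nzRow, List.countP_cons]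
      have := ih j h'
      simp only [nzRow] at this
      omega

theorem nzc_pvZeroN_le (m : List (List Int)) (i j : Nat) : nzc (pvZeroN m i j) ≤ nzc m := by
  induction m generalizing i with
  | nil => simp [pvZeroN]
  | cons r t ih =>
    cases i with
    | zero =>
      simp only [pvZeroN, nzc, List.map_cons, List.sum_cons]
      have := nzRow_set_le r j
      omega
    | succ i =>
      simp only [pvZeroN, nzc, List.map_cons, List.sum_cons]
      have := ih i
      simp only [nzc] at this
      omega

theorem nzc_pvZeroN_lt (m : List (List Int)) (i j : Nat) (h : pvCellN m i j ≠ 0) : nzc (pvZeroN m i j) < nzc m := by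
  induction m generalizing i with
  | nil => simp [pvCellN] at h
  | cons r t ih =>
    cases i with
    | zero =>
      have hr : r.getD j 0 ≠ 0 := by simpa [pvCellN] using h
      simp only [pvZeroN, nzc, List.map_cons, List.sum_cons]
      have := nzRow_set_lt r j hr
      omega
    | succ i =>
      have h' : pvCellN t i j ≠ 0 := by simpa [pvCellN] using h
      simp only [pvZeroN, nzc, List.map_cons, List.sum_cons]
      have := ih i h'
      simp only [nzc] at this
      omega

theorem nzc_pvZero_le (m : List (List Int)) (x y : Int) : nzc (pvZero m x y) ≤ nzc m :=
  nzc_pvZeroN_le m _ _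
theorem nzc_pvZero_lt (m : List (List Int)) (x y : Int) (h : pvCell m x y ≠ 0) : nzc (pvZero m x y) < nzc m :=
  nzc_pvZeroN_lt m _ _ h

-- fuel bookkeeping for goB: the loop measure, strict decrease, and fuel-irrelevance
def muB (m : List (List Int)) (stack : List (Int × Int)) (first : Bool) : Nat :=
  9 * nzc m + stack.length + 9 * first.toNat

theorem muB_skip_lt (m : List (List Int)) (p : Int × Int) (rest : List (Int × Int)) (first : Bool) :
    muB m rest false < muB m (p :: rest) first := by
  simp [muB]; omega

theorem muB_proc_lt (m : List (List Int)) (cx cy : Int) (rest : List (Int × Int)) (first : Bool)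
    (h : ¬(first = false ∧ pvCell m cx cy = 0)) :
    muB (pvZero m cx cy) ((nbrs cx cy).filter (okB (pvH (pvZero m cx cy)) (pvW (pvZero m cx cy))) ++ rest) false
      < muB m ((cx, cy) :: rest) first := by
  have hle := nzc_pvZero_le m cx cy
  have hfl : ((nbrs cx cy).filter (okB (pvH (pvZero m cx cy)) (pvW (pvZero m cx cy)))).length ≤ 8 :=
    le_trans (List.length_filter_le _ _) (Nat.le_of_eq rfl)
  simp only [muB, List.length_append, List.length_cons]
  by_cases hc : pvCell m cx cy = 0
  · have hft : first = true := by
      cases first with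
      | false => exact absurd ⟨rfl, hc⟩ h
      | true => rfl
    subst hft
    simp only [Bool.toNat_false, Bool.toNat_true]
    omega
  · have hlt := nzc_pvZero_lt m cx cy hc
    cases first <;> simp only [Bool.toNat_false, Bool.toNat_true] <;> omega

theorem goB_irrel : ∀ (fb fb' : Nat) (m : List (List Int)) (acc stack : List (Int × Int)) (first : Bool),
    muB m stack first < fb → muB m stack first < fb' →
    goB fb m acc stack first = goB fb' m acc stack first := by
  intro fb
  induction fb with
  | zero => intro fb' m acc stack first h _; omega
  | succ g IHg =>
    intro fb' m acc stack first h h'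
    match fb', stack with
    | 0, _ => omega
    | g' + 1, [] => rfl
    | g' + 1, (cx, cy) :: rest =>
      have hmu : muB m ((cx, cy) :: rest) first < g + 1 := h
      have hmu' : muB m ((cx, cy) :: rest) first < g' + 1 := h'
      by_cases hc : first = false ∧ pvCell m cx cy = 0
      · have hd := muB_skip_lt m (cx, cy) rest first
        rw [goB, goB, if_pos hc, if_pos hc]
        exact IHg g' m acc rest false (by omega) (by omega)
      · have hd := muB_proc_lt m cx cy rest first hc
        rw [goB, goB, if_neg hc, if_neg hc]
        exact IHg g' (pvZero m cx cy) (acc ++ [(cx, cy)])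
          ((nbrs cx cy).filter (okB (pvH (pvZero m cx cy)) (pvW (pvZero m cx cy))) ++ rest) false
          (by omega) (by omega)

-- goB with canonical (always-sufficient) fuel, and its three unfolding equations
def Gb (m : List (List Int)) (acc stack : List (Int × Int)) (first : Bool) : PvSt :=
  goB (muB m stack first + 1) m acc stack first

theorem Gb_nil (m : List (List Int)) (acc : List (Int × Int)) (first : Bool) :
    Gb m acc [] first = (m, acc) := rfl

theorem Gb_skip (m : List (List Int)) (acc : List (Int × Int)) (cx cy : Int)
    (rest : List (Int × Int)) (hc : pvCell m cx cy = 0) :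
    Gb m acc ((cx, cy) :: rest) false = Gb m acc rest false := by
  have hd := muB_skip_lt m (cx, cy) rest false
  show goB (muB m ((cx, cy) :: rest) false + 1) m acc ((cx, cy) :: rest) false = _
  rw [goB, if_pos ⟨rfl, hc⟩]
  exact goB_irrel (muB m ((cx, cy) :: rest) false) (muB m rest false + 1) m acc rest false
    (by omega) (by omega)

theorem Gb_proc (m : List (List Int)) (acc : List (Int × Int)) (cx cy : Int)
    (rest : List (Int × Int)) (first : Bool) (h : ¬(first = false ∧ pvCell m cx cy = 0)) :
    Gb m acc ((cx, cy) :: rest) first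
      = Gb (pvZero m cx cy) (acc ++ [(cx, cy)])
          ((nbrs cx cy).filter (okB (pvH (pvZero m cx cy)) (pvW (pvZero m cx cy))) ++ rest) false := by
  have hd := muB_proc_lt m cx cy rest first h
  show goB (muB m ((cx, cy) :: rest) first + 1) m acc ((cx, cy) :: rest) first = _
  rw [goB, if_neg h]
  exact goB_irrel (muB m ((cx, cy) :: rest) first) _ (pvZero m cx cy) (acc ++ [(cx, cy)])
    ((nbrs cx cy).filter (okB (pvH (pvZero m cx cy)) (pvW (pvZero m cx cy))) ++ rest) false
    (by omega) (by omega)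

def GoodSt (m0 : List (List Int)) (s : PvSt) : Prop :=
  pvH s.1 = pvH m0 ∧ pvW s.1 = pvW m0 ∧ nzc s.1 ≤ nzc m0

theorem pvZeroN_length (m : List (List Int)) (i j : Nat) : (pvZeroN m i j).length = m.length := by
  induction m generalizing i with
  | nil => rfl
  | cons r t ih => cases i <;> simp [pvZeroN, ih]

theorem pvH_pvZero (m : List (List Int)) (x y : Int) : pvH (pvZero m x y) = pvH m := by
  simp [pvH, pvZero, pvZeroN_length]

theorem pvW_pvZero (m : List (List Int)) (x y : Int) : pvW (pvZero m x y) = pvW m := by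
  show pvW (pvZeroN m x.toNat y.toNat) = pvW m
  cases m with
  | nil => rfl
  | cons r t => cases x.toNat <;> simp [pvZeroN, pvW]

theorem goodSt_zero (m : List (List Int)) (x y : Int) (acc : List (Int × Int)) :
    GoodSt m (pvZero m x y, acc) :=
  ⟨pvH_pvZero m x y, pvW_pvZero m x y, nzc_pvZero_le m x y⟩

theorem goodSt_trans (m0 : List (List Int)) (s t : PvSt)
    (h1 : GoodSt s.1 t) (h2 : GoodSt m0 s) : GoodSt m0 t :=
  ⟨h1.1.trans h2.1, h1.2.1.trans h2.2.1, h1.2.2.trans h2.2.2⟩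

theorem goodA : ∀ (f : Nat) (m : List (List Int)) (x y : Int) (acc : List (Int × Int)),
    GoodSt m (goA f m x y acc) := by
  intro f
  induction f with
  | zero => intro m x y acc; rw [goA]; exact ⟨rfl, rfl, le_refl _⟩
  | succ f IH =>
    intro m x y acc
    have gstep : ∀ (cnd : PvSt → Prop) [DecidablePred cnd] (a b : Int) (s : PvSt),
        GoodSt m s → GoodSt m (goAstep (goA f) cnd a b s) := by
      intro cnd _ a b s hs
      rw [goAstep]
      split
      · exact goodSt_trans m s _ (IH s.1 a b s.2) hs
      · exact hs
    rw [goA]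
    apply gstep; apply gstep; apply gstep; apply gstep
    apply gstep; apply gstep; apply gstep; apply gstep
    exact goodSt_zero m x y _

theorem goodAstep (f : Nat) (m0 : List (List Int)) (cnd : PvSt → Prop) [DecidablePred cnd]
    (a b : Int) (s : PvSt) (hs : GoodSt m0 s) : GoodSt m0 (goAstep (goA f) cnd a b s) := by
  rw [goAstep]
  split
  · exact goodSt_trans m0 s _ (goodA f s.1 a b s.2) hs
  · exact hs

def stepP (g : Nat) (H W : Int) (s : PvSt) (p : Int × Int) : PvSt :=
  if okB H W p = true ∧ pvCell s.1 p.1 p.2 ≠ 0 then goA g s.1 p.1 p.2 s.2 else s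

theorem stepP_eq (g : Nat) (H W : Int) (s : PvSt) (a b : Int)
    (cnd : PvSt → Prop) [DecidablePred cnd]
    (h : (okB H W (a, b) = true ∧ pvCell s.1 a b ≠ 0) ↔ cnd s) :
    stepP g H W s (a, b) = goAstep (goA g) cnd a b s := by
  rw [stepP, goAstep]
  exact if_congr h rfl rfl

-- A's 8 guarded recursive calls = folding the guarded step over the neighbour list
theorem chainEq (g : Nat) (m : List (List Int)) (x y : Int) (acc : List (Int × Int))
    (hx : 0 ≤ x) (hx2 : x < pvH m) (hy : 0 ≤ y) (hy2 : y < pvW m) :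
    goA (g + 1) m x y acc
      = List.foldl (stepP g (pvH m) (pvW m)) (pvZero m x y, acc ++ [(x, y)]) (nbrs x y) := by
  rw [goA, nbrs]
  simp only [List.foldl_cons, List.foldl_nil]
  have g0 : GoodSt m (pvZero m x y, acc ++ [(x, y)]) := goodSt_zero m x y _
  rw [stepP_eq g (pvH m) (pvW m) _ (x - 1) y (fun s => 0 ≤ x - 1 ∧ pvCell s.1 (x - 1) y ≠ 0)
    (by simp only [okB, decide_eq_true_eq]
        constructor
        · rintro ⟨⟨h1, _, _, _⟩, h5⟩; exact ⟨h1, h5⟩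
        · rintro ⟨h1, h5⟩; exact ⟨⟨h1, by omega, hy, hy2⟩, h5⟩)]
  have g1 := goodAstep g m (fun s => 0 ≤ x - 1 ∧ pvCell s.1 (x - 1) y ≠ 0) (x - 1) y _ g0
  rw [stepP_eq g (pvH m) (pvW m) _ x (y - 1) (fun s => 0 ≤ y - 1 ∧ pvCell s.1 x (y - 1) ≠ 0)
    (by simp only [okB, decide_eq_true_eq]
        constructor
        · rintro ⟨⟨_, _, h3, _⟩, h5⟩; exact ⟨h3, h5⟩
        · rintro ⟨h3, h5⟩; exact ⟨⟨hx, hx2, h3, by omega⟩, h5⟩)]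
  have g2 := goodAstep g m (fun s => 0 ≤ y - 1 ∧ pvCell s.1 x (y - 1) ≠ 0) x (y - 1) _ g1
  rw [stepP_eq g (pvH m) (pvW m) _ x (y + 1) (fun s => y + 1 < pvW s.1 ∧ pvCell s.1 x (y + 1) ≠ 0)
    (by simp only [okB, decide_eq_true_eq, g2.2.1]
        constructor
        · rintro ⟨⟨_, _, _, h4⟩, h5⟩; exact ⟨h4, h5⟩
        · rintro ⟨h4, h5⟩; exact ⟨⟨hx, hx2, by omega, h4⟩, h5⟩)]
  have g3 := goodAstep g m (fun s => y + 1 < pvW s.1 ∧ pvCell s.1 x (y + 1) ≠ 0) x (y + 1) _ g2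
  rw [stepP_eq g (pvH m) (pvW m) _ (x + 1) y (fun s => x + 1 < pvH s.1 ∧ pvCell s.1 (x + 1) y ≠ 0)
    (by simp only [okB, decide_eq_true_eq, g3.1]
        constructor
        · rintro ⟨⟨_, h2, _, _⟩, h5⟩; exact ⟨h2, h5⟩
        · rintro ⟨h2, h5⟩; exact ⟨⟨by omega, h2, hy, hy2⟩, h5⟩)]
  have g4 := goodAstep g m (fun s => x + 1 < pvH s.1 ∧ pvCell s.1 (x + 1) y ≠ 0) (x + 1) y _ g3
  rw [stepP_eq g (pvH m) (pvW m) _ (x - 1) (y - 1) (fun s => 0 ≤ x - 1 ∧ 0 ≤ y - 1 ∧ pvCell s.1 (x - 1) (y - 1) ≠ 0)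
    (by simp only [okB, decide_eq_true_eq]
        constructor
        · rintro ⟨⟨h1, _, h3, _⟩, h5⟩; exact ⟨h1, h3, h5⟩
        · rintro ⟨h1, h3, h5⟩; exact ⟨⟨h1, by omega, h3, by omega⟩, h5⟩)]
  have g5 := goodAstep g m (fun s => 0 ≤ x - 1 ∧ 0 ≤ y - 1 ∧ pvCell s.1 (x - 1) (y - 1) ≠ 0) (x - 1) (y - 1) _ g4
  rw [stepP_eq g (pvH m) (pvW m) _ (x - 1) (y + 1) (fun s => 0 ≤ x - 1 ∧ y + 1 < pvW s.1 ∧ pvCell s.1 (x - 1) (y + 1) ≠ 0)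
    (by simp only [okB, decide_eq_true_eq, g5.2.1]
        constructor
        · rintro ⟨⟨h1, _, _, h4⟩, h5⟩; exact ⟨h1, h4, h5⟩
        · rintro ⟨h1, h4, h5⟩; exact ⟨⟨h1, by omega, by omega, h4⟩, h5⟩)]
  have g6 := goodAstep g m (fun s => 0 ≤ x - 1 ∧ y + 1 < pvW s.1 ∧ pvCell s.1 (x - 1) (y + 1) ≠ 0) (x - 1) (y + 1) _ g5
  rw [stepP_eq g (pvH m) (pvW m) _ (x + 1) (y - 1) (fun s => x + 1 < pvH s.1 ∧ 0 ≤ y - 1 ∧ pvCell s.1 (x + 1) (y - 1) ≠ 0)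
    (by simp only [okB, decide_eq_true_eq, g6.1]
        constructor
        · rintro ⟨⟨_, h2, h3, _⟩, h5⟩; exact ⟨h2, h3, h5⟩
        · rintro ⟨h2, h3, h5⟩; exact ⟨⟨by omega, h2, h3, by omega⟩, h5⟩)]
  have g7 := goodAstep g m (fun s => x + 1 < pvH s.1 ∧ 0 ≤ y - 1 ∧ pvCell s.1 (x + 1) (y - 1) ≠ 0) (x + 1) (y - 1) _ g6
  rw [stepP_eq g (pvH m) (pvW m) _ (x + 1) (y + 1) (fun s => x + 1 < pvH s.1 ∧ y + 1 < pvW s.1 ∧ pvCell s.1 (x + 1) (y + 1) ≠ 0)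
    (by simp only [okB, decide_eq_true_eq, g7.1, g7.2.1]
        constructor
        · rintro ⟨⟨_, h2, _, h4⟩, h5⟩; exact ⟨h2, h4, h5⟩
        · rintro ⟨h2, h4, h5⟩; exact ⟨⟨by omega, h2, by omega, h4⟩, h5⟩)]


-- popping a run of pushed neighbours = folding the guarded step over them (Gb = goB with canonical fuel)
theorem foldB (g : Nat) (H W : Int)
    (IH : ∀ (m : List (List Int)) (x y : Int) (acc rest : List (Int × Int)),
      0 ≤ x → x < pvH m → 0 ≤ y → y < pvW m → pvCell m x y ≠ 0 → nzc m < g →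
      Gb m acc ((x, y) :: rest) false
        = Gb (goA g m x y acc).1 (goA g m x y acc).2 rest false) :
    ∀ (ps : List (Int × Int)) (m : List (List Int)) (acc rest : List (Int × Int)),
      pvH m = H → pvW m = W → nzc m < g →
      Gb m acc (ps.filter (okB H W) ++ rest) false
        = Gb (List.foldl (stepP g H W) (m, acc) ps).1 (List.foldl (stepP g H W) (m, acc) ps).2 rest false := by
  intro ps
  induction ps with
  | nil => intro m acc rest _ _ _; simp
  | cons p tl IHt =>
    obtain ⟨a, b⟩ := p
    intro m acc rest hH hW hg
    rw [List.foldl_cons]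
    by_cases hok : okB H W (a, b) = true
    · have hb : 0 ≤ a ∧ a < H ∧ 0 ≤ b ∧ b < W := by
        simpa [okB] using hok
      by_cases hc : pvCell m a b = 0
      · rw [List.filter_cons_of_pos hok, List.cons_append]
        rw [show stepP g H W (m, acc) (a, b) = (m, acc) from by simp [stepP, hc]]
        rw [Gb_skip m acc a b (List.filter (okB H W) tl ++ rest) hc]
        exact IHt m acc rest hH hW hg
      · rw [List.filter_cons_of_pos hok, List.cons_append]
        rw [show stepP g H W (m, acc) (a, b) = goA g m a b acc from by simp [stepP, hok, hc]]
        rw [IH m a b acc _ hb.1 (by omega) hb.2.2.1 (by omega) hc hg]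
        have gA := goodA g m a b acc
        exact IHt (goA g m a b acc).1 (goA g m a b acc).2 rest (gA.1.trans hH) (gA.2.1.trans hW)
          (lt_of_le_of_lt gA.2.2 hg)
    · rw [List.filter_cons_of_neg (by simpa using hok)]
      rw [show stepP g H W (m, acc) (a, b) = (m, acc) from by simp [stepP, hok]]
      exact IHt m acc rest hH hW hg

theorem mainB : ∀ (f : Nat) (m : List (List Int)) (x y : Int) (acc rest : List (Int × Int)),
    0 ≤ x → x < pvH m → 0 ≤ y → y < pvW m → pvCell m x y ≠ 0 → nzc m < f →
    Gb m acc ((x, y) :: rest) false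
      = Gb (goA f m x y acc).1 (goA f m x y acc).2 rest false := by
  intro f
  induction f with
  | zero => intro m x y acc rest _ _ _ _ _ hf; omega
  | succ g IH =>
    intro m x y acc rest hx hx2 hy hy2 hc hf
    have hnz : nzc (pvZero m x y) < g := by
      have := nzc_pvZero_lt m x y hc; omega
    rw [Gb_proc m acc x y rest false (by rintro ⟨_, h⟩; exact hc h)]
    rw [pvH_pvZero, pvW_pvZero,
      foldB g (pvH m) (pvW m) IH (nbrs x y) (pvZero m x y) (acc ++ [(x, y)]) rest
        (pvH_pvZero m x y) (pvW_pvZero m x y) hnz,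
      chainEq g m x y acc hx hx2 hy hy2]

-- ===== VERDICT (by name: the statement is the Claim_ definition above) =====
theorem check_sides_spec : Claim_equal_check_sides := by
  intro matrix x y l _ hpre
  obtain ⟨hx, hx2, hy, hy2, _⟩ := hpre
  show check_sides matrix x y l = check_sides_alt matrix x y l
  unfold check_sides check_sides_alt
  have hnz : nzc (pvZero matrix x y) < nzc matrix + 1 :=
    lt_of_le_of_lt (nzc_pvZero_le matrix x y) (by omega)
  rw [show goB (9 * nzc matrix + 19) matrix (l.getD []) [(x, y)] true
        = Gb matrix (l.getD []) [(x, y)] true from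
      goB_irrel (9 * nzc matrix + 19) (muB matrix [(x, y)] true + 1) matrix (l.getD []) [(x, y)] true
        (by simp [muB]) (by omega)]
  rw [Gb_proc matrix (l.getD []) x y [] true (by rintro ⟨h, _⟩; cases h)]
  rw [pvH_pvZero, pvW_pvZero,
    foldB (nzc matrix + 1) (pvH matrix) (pvW matrix) (mainB (nzc matrix + 1)) (nbrs x y)
      (pvZero matrix x y) ((l.getD []) ++ [(x, y)]) [] (pvH_pvZero matrix x y)
      (pvW_pvZero matrix x y) hnz,
    ← chainEq (nzc matrix + 1) matrix x y (l.getD []) hx hx2 hy hy2]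
  rw [Gb_nil]
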